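-- pv_equiv track=rewrite | github.com/vthamada/jarvis | shared/optimization_state.py | optimization_target_kind
-- ===== SOURCE A (Python) =====
-- from collections import Counter
--
-- _PROMPT_AXES = {
--     "workflow_output",
--     "metacognitive_guidance",
-- }
--
-- _WORKFLOW_AXES = {
--     "workflow_profile",
--     "workflow_checkpointing",
--     "workflow_resume",
--     "procedural_artifacts",
-- }
--
-- def _priority_rank(priority: str | None) -> int:
--     return {"p0": 0, "p1": 1, "p2": 2}.get(priority or "", 9)
--
-- def optimization_target_kind(
--     refinement_vectors: list[dict[str, object]] | None,
-- ) -> str: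
--     vectors = list(refinement_vectors or [])
--     if not vectors:
--         return "not_applicable"
--
--     by_kind: Counter[str] = Counter()
--     best_priority: dict[str, int] = {}
--     for vector in vectors:
--         axis = str(vector.get("axis", ""))
--         priority = _priority_rank(str(vector.get("priority", "")))
--         if axis in _PROMPT_AXES:
--             kind = "prompt"
--         elif axis in _WORKFLOW_AXES:
--             kind = "workflow"
--         else:
--             kind = "plan"
--         by_kind[kind] += 1
--         current_best = best_priority.get(kind, 99)
--         if priority < current_best:
--             best_priority[kind] = priority
--
--     if len(by_kind) == 1:
--         return next(iter(by_kind))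
--
--     ranked = sorted(
--         by_kind,
--         key=lambda kind: (best_priority.get(kind, 99), -by_kind[kind], kind),
--     )
--     if len(ranked) > 1 and best_priority.get(ranked[0], 99) == best_priority.get(
--         ranked[1], 99
--     ):
--         return "multi_target"
--     return ranked[0]
-- ===== SOURCE B (Python) =====
-- _PROMPT_AXES = {
--     "workflow_output",
--     "metacognitive_guidance",
-- }
--
-- _WORKFLOW_AXES = {
--     "workflow_profile",
--     "workflow_checkpointing",
--     "workflow_resume",
--     "procedural_artifacts",
-- }
--
-- def _priority_rank(priority):
--     return {"p0": 0, "p1": 1, "p2": 2}.get(priority or "", 9)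
--
-- def optimization_target_kind(refinement_vectors):
--     if not refinement_vectors:
--         return "not_applicable"
--     best = {}
--     for vector in refinement_vectors:
--         axis = str(vector.get("axis", ""))
--         if axis in _PROMPT_AXES:
--             kind = "prompt"
--         elif axis in _WORKFLOW_AXES:
--             kind = "workflow"
--         else:
--             kind = "plan"
--         p = _priority_rank(str(vector.get("priority", "")))
--         if kind not in best or p < best[kind]:
--             best[kind] = p
--     m = min(best.values())
--     winners = [k for k, v in best.items() if v == m]
--     return winners[0] if len(winners) == 1 else "multi_target"
-- ===== Notes on version B (the rewrite author's own statement) =====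
-- stated objective: simpler
-- what changed: B drops the Counter and the three-key sort entirely: one pass keeps only the best (minimum) priority rank per kind, then returns the unique kind achieving the overall minimum, or 'multi_target' on a tie - the count and lexicographic tiebreakers in A's sort never affect the output.
import Mathlib
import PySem

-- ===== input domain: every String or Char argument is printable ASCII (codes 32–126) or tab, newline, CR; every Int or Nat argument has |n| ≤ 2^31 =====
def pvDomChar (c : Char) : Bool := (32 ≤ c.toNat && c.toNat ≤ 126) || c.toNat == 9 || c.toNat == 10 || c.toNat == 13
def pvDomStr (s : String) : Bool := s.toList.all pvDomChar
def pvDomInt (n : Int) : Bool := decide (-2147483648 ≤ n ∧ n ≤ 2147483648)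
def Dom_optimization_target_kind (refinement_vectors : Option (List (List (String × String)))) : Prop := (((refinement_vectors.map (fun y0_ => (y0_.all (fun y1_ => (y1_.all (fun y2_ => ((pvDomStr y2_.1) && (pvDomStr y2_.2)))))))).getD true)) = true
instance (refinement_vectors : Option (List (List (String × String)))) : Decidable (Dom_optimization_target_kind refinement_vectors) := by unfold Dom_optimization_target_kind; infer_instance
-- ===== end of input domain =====

-- B replaces A's Counter plus three-key sort by a single best-priority-per-kind pass and a
-- minimum scan (objective: simpler); the count/lexicographic tiebreakers in A's sort are inert.

-- ===== PORT A =====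
-- module constants _PROMPT_AXES / _WORKFLOW_AXES (Python sets of distinct string literals)
def pvPromptAxes : List String := ["workflow_output", "metacognitive_guidance"]
def pvWorkflowAxes : List String :=
  ["workflow_profile", "workflow_checkpointing", "workflow_resume", "procedural_artifacts"]

-- _priority_rank: {"p0":0,"p1":1,"p2":2}.get(priority or "", 9); 'priority or ""' is the
-- identity on strings (it maps "" to ""), so it is dropped
def pvPriorityRank (priority : String) : Int :=
  PySem.Dict.getD (PySem.Dict.mk [("p0", 0), ("p1", 1), ("p2", 2)]) priority 9

-- the body of A's for-loop; state = (by_kind, best_priority)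
def pvStepA (s : PySem.Dict String Int × PySem.Dict String Int)
    (vector : List (String × String)) :
    PySem.Dict String Int × PySem.Dict String Int :=
  let d := PySem.Dict.mk vector
  let axis := d.getD "axis" ""                       -- str(vector.get("axis", "")); str is id here
  let priority := pvPriorityRank (d.getD "priority" "")
  let kind := if pvPromptAxes.contains axis then "prompt"
              else if pvWorkflowAxes.contains axis then "workflow"
              else "plan"
  (s.1.modify kind 0 (· + 1),                        -- by_kind[kind] += 1  (Counter update)
   if priority < s.2.getD kind 99 then s.2.insert kind priority else s.2)

def optimization_target_kind (refinement_vectors : Option (List (List (String × String)))) : String :=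
  let vectors := match refinement_vectors with
                 | none => ([] : List (List (String × String)))
                 | some l => l
  if vectors = [] then "not_applicable"
  else
    let st := vectors.foldl pvStepA (PySem.Dict.empty, PySem.Dict.empty)
    let byKind := st.1
    let bestPriority := st.2
    if byKind.size = 1 then byKind.keys.headD ""     -- next(iter(by_kind)); by_kind nonempty here
    else
      -- sorted(by_kind, key=...): the 3-tuple key compares lexicographically, ported as
      -- nested Prod.Lex over Int, Int, String (Python str '<' is Lean's String '<')
      let ranked := PySem.List.sorted byKind.keys
        (fun kind => toLex ((bestPriority.getD kind 99 : Int),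
                            toLex ((-(byKind.getD kind 0) : Int), kind)))
      match ranked with
      | r0 :: r1 :: _ =>
          if bestPriority.getD r0 99 == bestPriority.getD r1 99 then "multi_target" else r0
      | [r0] => r0
      | [] => ""                                     -- unreachable: by_kind is nonempty

-- ===== PORT B =====
-- the body of B's for-loop; state = best (minimum priority rank seen per kind)
def pvStepB (best : PySem.Dict String Int) (vector : List (String × String)) :
    PySem.Dict String Int :=
  let d := PySem.Dict.mk vector
  let axis := d.getD "axis" ""
  let kind := if pvPromptAxes.contains axis then "prompt"
              else if pvWorkflowAxes.contains axis then "workflow"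
              else "plan"
  let p := pvPriorityRank (d.getD "priority" "")
  match best.get? kind with                          -- 'kind not in best or p < best[kind]'
  | none => best.insert kind p
  | some v => if p < v then best.insert kind p else best

def optimization_target_kind_alt (refinement_vectors : Option (List (List (String × String)))) : String :=
  match refinement_vectors with
  | none => "not_applicable"
  | some vectors =>
    if vectors = [] then "not_applicable"
    else
      let best := vectors.foldl pvStepB PySem.Dict.empty
      let m := PySem.List.minD best.values (fun v => v) 0   -- min(best.values()); best nonempty
      let winners := (best.items.filter (fun kv => kv.2 == m)).map (fun kv => kv.1)
      match winners with
      | [w] => w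
      | _ => "multi_target"

-- ===== PRECONDITION & SPEC =====
def Spec_optimization_target_kind (refinement_vectors : Option (List (List (String × String)))) (out : String) : Prop := out = optimization_target_kind_alt refinement_vectors
instance (refinement_vectors : Option (List (List (String × String)))) (out : String) : Decidable (Spec_optimization_target_kind refinement_vectors out) := by unfold Spec_optimization_target_kind; infer_instance

-- ===== CLAIM (what is proved, stated in full; the proofs are below) =====
def Claim_equal_optimization_target_kind : Prop := ∀ (refinement_vectors : Option (List (List (String × String)))), Dom_optimization_target_kind refinement_vectors → Spec_optimization_target_kind refinement_vectors (optimization_target_kind refinement_vectors)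

-- ===== LEMMAS AND PROOFS =====

-- the kind a vector is classified into (shared shape of both loop bodies)
def pvKindOf (vector : List (String × String)) : String :=
  let axis := (PySem.Dict.mk vector).getD "axis" ""
  if pvPromptAxes.contains axis then "prompt"
  else if pvWorkflowAxes.contains axis then "workflow"
  else "plan"

-- the Counter component of A's loop, in isolation
def pvStepCnt (d : PySem.Dict String Int) (vector : List (String × String)) :
    PySem.Dict String Int :=
  d.modify (pvKindOf vector) 0 (· + 1)

lemma pvPriorityRank_le_9 (p : String) : pvPriorityRank p ≤ 9 := by
  by_cases h0 : p = "p0"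
  · subst h0; decide
  by_cases h1 : p = "p1"
  · subst h1; decide
  by_cases h2 : p = "p2"
  · subst h2; decide
  have e : pvPriorityRank p = 9 := by
    simp [pvPriorityRank, PySem.Dict.getD, PySem.Dict.get?, List.find?,
      beq_eq_false_iff_ne.mpr (Ne.symm h0), beq_eq_false_iff_ne.mpr (Ne.symm h1),
      beq_eq_false_iff_ne.mpr (Ne.symm h2)]
  rw [e]

-- the two loop bodies act componentwise: A's pair step is (Counter step, B's step)
lemma pvStepAB (c b : PySem.Dict String Int) (v : List (String × String)) :
    pvStepA (c, b) v = (pvStepCnt c v, pvStepB b v) := by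
  simp only [pvStepA, pvStepCnt, pvStepB, pvKindOf]
  refine Prod.ext rfl ?_
  simp only
  cases hg : PySem.Dict.get? b (if pvPromptAxes.contains ((PySem.Dict.mk v).getD "axis" "") then "prompt"
      else if pvWorkflowAxes.contains ((PySem.Dict.mk v).getD "axis" "") then "workflow" else "plan") with
  | none =>
      rw [PySem.Dict.getD_of_get?_eq_none b 99 hg]
      have := pvPriorityRank_le_9 ((PySem.Dict.mk v).getD "priority" "")
      rw [if_pos (by omega)]
  | some w =>
      rw [PySem.Dict.getD_of_get?_eq_some b 99 hg]

-- A's pair fold splits into the Counter fold and B's fold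
lemma pvFold_split (vs : List (List (String × String)))
    (c b : PySem.Dict String Int) :
    vs.foldl pvStepA (c, b) = (vs.foldl pvStepCnt c, vs.foldl pvStepB b) := by
  induction vs generalizing c b with
  | nil => rfl
  | cons v t ih => rw [List.foldl_cons, List.foldl_cons, List.foldl_cons, pvStepAB, ih]

-- one B-step appends the vector's kind to the key set
lemma pvKeysB_step (d : PySem.Dict String Int) (k : String) (p : Int) :
    (match d.get? k with
     | none => d.insert k p
     | some v => if p < v then d.insert k p else d).keys
    = PySem.Set.add d.keys k := by
  cases hg : PySem.Dict.get? d k with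
  | none =>
      have hc := (PySem.Dict.get?_eq_none_iff_contains d k).mp hg
      have hmem : k ∉ d.keys := fun hm =>
        by rw [(PySem.Dict.contains_iff_mem_keys d k).mpr hm] at hc; cases hc
      rw [PySem.Dict.keys_insert_of_not_contains d p hc]
      simp only [PySem.Set.add, PySem.Set.contains]
      rw [if_neg (by simpa using hmem)]
  | some w =>
      have hc : PySem.Dict.contains d k = true := by
        rw [PySem.Dict.contains_eq_isSome_get?, hg]; rfl
      have hmem := (PySem.Dict.contains_iff_mem_keys d k).mp hc
      have hadd : PySem.Set.add d.keys k = d.keys := by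
        simp only [PySem.Set.add, PySem.Set.contains]
        rw [if_pos (by simpa using hmem)]
      rw [hadd]
      split
      · exact PySem.Dict.keys_insert_of_contains d p hc
      · split
        · exact PySem.Dict.keys_insert_of_contains d p hc
        · rfl

lemma pvKeysB (vs : List (List (String × String))) (d : PySem.Dict String Int) :
    (vs.foldl pvStepB d).keys = PySem.Set.update d.keys (vs.map pvKindOf) := by
  induction vs generalizing d with
  | nil => rfl
  | cons v t ih =>
      rw [List.foldl_cons, List.map_cons, ih]
      have hupd : PySem.Set.update d.keys (pvKindOf v :: t.map pvKindOf)
          = PySem.Set.update (PySem.Set.add d.keys (pvKindOf v)) (t.map pvKindOf) := by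
        simp [PySem.Set.update]
      rw [hupd]
      congr 1
      show (pvStepB d v).keys = PySem.Set.add d.keys (pvKindOf v)
      simp only [pvStepB, pvKindOf]
      exact pvKeysB_step d _ _

-- one Counter step appends the vector's kind to the key set
lemma pvKeysCnt_step (d : PySem.Dict String Int) (k : String) :
    (d.modify k 0 (· + 1)).keys = PySem.Set.add d.keys k := by
  rw [PySem.Dict.keys_modify]
  by_cases hc : d.contains k = true
  · rw [PySem.Dict.keys_insert_of_contains d _ hc]
    have hmem := (PySem.Dict.contains_iff_mem_keys d k).mp hc
    simp only [PySem.Set.add, PySem.Set.contains]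
    rw [if_pos (by simpa using hmem)]
  · have hc' : d.contains k = false := by simpa using hc
    have hmem : k ∉ d.keys := fun hm =>
      by rw [(PySem.Dict.contains_iff_mem_keys d k).mpr hm] at hc'; cases hc'
    rw [PySem.Dict.keys_insert_of_not_contains d _ hc']
    simp only [PySem.Set.add, PySem.Set.contains]
    rw [if_neg (by simpa using hmem)]

lemma pvKeysCnt (vs : List (List (String × String))) (d : PySem.Dict String Int) :
    (vs.foldl pvStepCnt d).keys = PySem.Set.update d.keys (vs.map pvKindOf) := by
  induction vs generalizing d with
  | nil => rfl
  | cons v t ih =>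
      rw [List.foldl_cons, List.map_cons, ih]
      have hupd : PySem.Set.update d.keys (pvKindOf v :: t.map pvKindOf)
          = PySem.Set.update (PySem.Set.add d.keys (pvKindOf v)) (t.map pvKindOf) := by
        simp [PySem.Set.update]
      rw [hupd]
      congr 1
      exact pvKeysCnt_step d (pvKindOf v)

-- the two post-loop decisions agree on any pair of dicts with the loop invariants
lemma pvDecide_eq (cnt bp : PySem.Dict String Int)
    (hk : bp.keys = cnt.keys) (hnd : bp.keys.Nodup) (hne : bp.keys ≠ []) :
    (if cnt.size = 1 then cnt.keys.headD ""
     else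
       match PySem.List.sorted cnt.keys
         (fun kind => toLex ((bp.getD kind 99 : Int),
                             toLex ((-(cnt.getD kind 0) : Int), kind))) with
       | r0 :: r1 :: _ =>
           if bp.getD r0 99 == bp.getD r1 99 then "multi_target" else r0
       | [r0] => r0
       | [] => "")
    = (match (bp.items.filter
          (fun kv => kv.2 == PySem.List.minD bp.values (fun v => v) 0)).map
          (fun kv => kv.1) with
       | [w] => w
       | _ => "multi_target") := by
  have hval : bp.values = bp.keys.map (fun k => bp.getD k 99) :=
    PySem.Dict.values_eq_map_keys bp hnd 99
  have hitems : bp.items = bp.keys.map (fun k => (k, bp.getD k 99)) :=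
    PySem.Dict.items_eq_map_keys bp hnd 99
  obtain ⟨k0, Ktl, hK⟩ : ∃ k0 Ktl, bp.keys = k0 :: Ktl := by
    cases h : bp.keys with
    | nil => exact absurd h hne
    | cons a t => exact ⟨a, t, rfl⟩
  have hm : PySem.List.minD bp.values (fun v => v) 0
      = (Ktl.map (fun k => bp.getD k 99)).foldl min (bp.getD k0 99) := by
    rw [hval, hK, List.map_cons, PySem.List.minD, PySem.List.min?_id_cons, Option.getD_some]
  set m := (Ktl.map (fun k => bp.getD k 99)).foldl min (bp.getD k0 99) with hmdef
  have hmle : ∀ k ∈ bp.keys, m ≤ bp.getD k 99 := by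
    intro k hk'
    rw [hK] at hk'
    rcases List.mem_cons.mp hk' with h | h
    · rw [h]; exact (PySem.List.foldl_min_le _ _).1
    · exact (PySem.List.foldl_min_le _ _).2 _ (List.mem_map_of_mem h)
  have hmmem : ∃ km ∈ bp.keys, bp.getD km 99 = m := by
    rcases PySem.List.foldl_min_mem (Ktl.map (fun k => bp.getD k 99)) (bp.getD k0 99) with h | h
    · exact ⟨k0, by rw [hK]; exact List.mem_cons_self, by rw [hmdef]; exact h.symm⟩
    · obtain ⟨km, hkm, he⟩ := List.mem_map.mp h
      exact ⟨km, by rw [hK]; exact List.mem_cons_of_mem _ hkm, he⟩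
  have hwin : (bp.items.filter
        (fun kv => kv.2 == PySem.List.minD bp.values (fun v => v) 0)).map (fun kv => kv.1)
      = bp.keys.filter (fun k => bp.getD k 99 == m) := by
    rw [hitems, hm, List.filter_map, List.map_map]
    simp [Function.comp_def]
  rw [hwin]
  have hszlen : cnt.size = bp.keys.length := by
    rw [hk]; simp [PySem.Dict.size, PySem.Dict.keys]
  by_cases hsz : cnt.size = 1
  · rw [if_pos hsz]
    have hKtl : Ktl = [] := by
      rw [hszlen, hK] at hsz; simpa using hsz
    subst hKtl
    have hmeq : m = bp.getD k0 99 := by rw [hmdef]; rfl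
    have : bp.keys.filter (fun k => bp.getD k 99 == m) = [k0] := by
      rw [hK, List.filter_cons, if_pos (by simp [hmeq]), List.filter_nil]
    rw [this, ← hk, hK]
    rfl
  · rw [if_neg hsz]
    have hlen2 : 2 ≤ bp.keys.length := by
      rw [hszlen] at hsz
      rw [hK] at hsz ⊢
      simp only [List.length_cons] at hsz ⊢
      omega
    obtain ⟨r0, r1, rest, hr⟩ : ∃ r0 r1 rest, PySem.List.sorted cnt.keys
        (fun kind => toLex ((bp.getD kind 99 : Int),
                            toLex ((-(cnt.getD kind 0) : Int), kind))) = r0 :: r1 :: rest := by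
      have hlp := (PySem.List.sorted_perm cnt.keys
        (fun kind => toLex ((bp.getD kind 99 : Int),
                            toLex ((-(cnt.getD kind 0) : Int), kind))) false).length_eq
      cases hs : PySem.List.sorted cnt.keys
          (fun kind => toLex ((bp.getD kind 99 : Int),
                              toLex ((-(cnt.getD kind 0) : Int), kind))) with
      | nil => rw [hs] at hlp; rw [← hk] at hlp; simp at hlp; omega
      | cons a t =>
          cases t with
          | nil => rw [hs] at hlp; rw [← hk] at hlp; simp at hlp; omega
          | cons b u => exact ⟨a, b, u, rfl⟩
    rw [hr]
    show (if (bp.getD r0 99 == bp.getD r1 99) = true then "multi_target" else r0) = _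
    have hperm := PySem.List.sorted_perm cnt.keys
      (fun kind => toLex ((bp.getD kind 99 : Int),
                          toLex ((-(cnt.getD kind 0) : Int), kind))) false
    rw [hr] at hperm
    have hpair := PySem.List.sorted_pairwise cnt.keys
      (fun kind => toLex ((bp.getD kind 99 : Int),
                          toLex ((-(cnt.getD kind 0) : Int), kind)))
    rw [hr] at hpair
    have hfst : ∀ a b : String,
        (toLex ((bp.getD a 99 : Int), toLex ((-(cnt.getD a 0) : Int), a))
          ≤ toLex ((bp.getD b 99 : Int), toLex ((-(cnt.getD b 0) : Int), b)))
        → bp.getD a 99 ≤ bp.getD b 99 := by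
      intro a b hab
      rcases Prod.Lex.le_iff.mp hab with h | ⟨h, _⟩
      · simpa using le_of_lt h
      · simpa using le_of_eq h
    have hhead := PySem.List.key_head_sorted_le cnt.keys
      (fun kind => toLex ((bp.getD kind 99 : Int),
                          toLex ((-(cnt.getD kind 0) : Int), kind))) hr
    have hr0K : r0 ∈ bp.keys := by
      rw [hk]; exact hperm.subset List.mem_cons_self
    have hr1K : r1 ∈ bp.keys := by
      rw [hk]; exact hperm.subset (List.mem_cons_of_mem _ List.mem_cons_self)
    have hm0 : m = bp.getD r0 99 := by
      obtain ⟨km, hkm, hgkm⟩ := hmmem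
      refine le_antisymm (hmle r0 hr0K) ?_
      calc bp.getD r0 99 ≤ bp.getD km 99 := hfst _ _ (hhead km (hk ▸ hkm))
        _ = m := hgkm
    have hle01 : bp.getD r0 99 ≤ bp.getD r1 99 :=
      hfst _ _ ((List.pairwise_cons.mp hpair).1 r1 List.mem_cons_self)
    have h1le : ∀ x ∈ r1 :: rest, bp.getD r1 99 ≤ bp.getD x 99 := by
      intro x hx
      rcases List.mem_cons.mp hx with h | h
      · rw [h]
      · exact hfst _ _ ((List.pairwise_cons.mp (List.pairwise_cons.mp hpair).2).1 x h)
    have hndr : (r0 :: r1 :: rest).Nodup := hperm.nodup_iff.mpr (hk ▸ hnd)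
    have hr01 : r0 ≠ r1 := by
      intro h
      exact (List.nodup_cons.mp hndr).1 (h ▸ List.mem_cons_self)
    by_cases hbe : bp.getD r0 99 = bp.getD r1 99
    · rw [if_pos (by simpa using hbe)]
      have hr0f : r0 ∈ bp.keys.filter (fun k => bp.getD k 99 == m) :=
        List.mem_filter.mpr ⟨hr0K, by simp [hm0]⟩
      have hr1f : r1 ∈ bp.keys.filter (fun k => bp.getD k 99 == m) :=
        List.mem_filter.mpr ⟨hr1K, by simp [hm0, hbe]⟩
      cases hw : bp.keys.filter (fun k => bp.getD k 99 == m) with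
      | nil => rfl
      | cons a t =>
          cases t with
          | nil =>
              rw [hw] at hr0f hr1f
              simp only [List.mem_singleton] at hr0f hr1f
              exact absurd (hr0f.trans hr1f.symm) hr01
          | cons b u => rfl
    · rw [if_neg (by simpa using hbe)]
      have honly : ∀ x ∈ bp.keys, (bp.getD x 99 == m) = (x == r0) := by
        intro x hx
        by_cases hxr : x = r0
        · rw [hxr]; simp [hm0]
        · have hxr' : x ∈ r1 :: rest := by
            rcases List.mem_cons.mp (hperm.mem_iff.mpr (hk ▸ hx)) with h | h
            · exact absurd h hxr
            · exact h
          have hlt : bp.getD r0 99 < bp.getD r1 99 := lt_of_le_of_ne hle01 hbe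
          have hxm : bp.getD x 99 ≠ m := by
            have := h1le x hxr'
            rw [hm0]; omega
          simp [hxm, hxr]
      rw [List.filter_congr honly, List.filter_beq,
        List.count_eq_one_of_mem hnd hr0K, List.replicate_one]

-- ===== VERDICT (by name: the statement is the Claim_ definition above) =====
theorem optimization_target_kind_spec : Claim_equal_optimization_target_kind := by
  unfold Claim_equal_optimization_target_kind
  intro rv _
  unfold Spec_optimization_target_kind
  cases rv with
  | none => rfl
  | some vs =>
      by_cases hvs : vs = []
      · rw [hvs]; rfl
      · simp only [optimization_target_kind, optimization_target_kind_alt,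
          if_neg hvs, pvFold_split]
        have hkeysB : (vs.foldl pvStepB PySem.Dict.empty).keys
            = PySem.Set.ofList (vs.map pvKindOf) := by
          rw [pvKeysB, PySem.Dict.keys_empty]; rfl
        have hk : (vs.foldl pvStepB PySem.Dict.empty).keys
            = (vs.foldl pvStepCnt PySem.Dict.empty).keys := by
          rw [hkeysB, pvKeysCnt, PySem.Dict.keys_empty]; rfl
        have hnd : (vs.foldl pvStepB PySem.Dict.empty).keys.Nodup := by
          rw [hkeysB]; exact PySem.Set.nodup_ofList _
        have hne : (vs.foldl pvStepB PySem.Dict.empty).keys ≠ [] := by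
          rw [hkeysB]
          obtain ⟨v, t, rfl⟩ : ∃ v t, vs = v :: t := by
            cases vs with
            | nil => exact absurd rfl hvs
            | cons v t => exact ⟨v, t, rfl⟩
          exact List.ne_nil_of_mem
            ((PySem.Set.mem_ofList _ _).mpr (List.mem_map_of_mem List.mem_cons_self))
        exact pvDecide_eq _ _ hk hnd hne
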